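-- pv_equiv track=rewrite | github.com/benmsanderson/SRMfair | functions.py | find_consecutive_zeros
-- ===== SOURCE A (Python) =====
-- def find_consecutive_zeros(arr):
--     """
--     Find consecutive zeros in an array.
--
--     Parameters:
--     ----------
--     arr : array-like
--         Input array.
--
--     Returns:
--     -------
--     consecutive_zeros : list of lists
--         List of indices of consecutive zeros.
--     """
--     consecutive_zeros = []
--     current_zeros = []
--
--     for i, value in enumerate(arr):
--         if value == 0:
--             current_zeros.append(i)
--         else:
--             if current_zeros:
--                 consecutive_zeros.append(current_zeros)
--                 current_zeros = []
--
--     if current_zeros: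
--         consecutive_zeros.append(current_zeros)
--
--     return consecutive_zeros
-- ===== SOURCE B (Python) =====
-- def find_consecutive_zeros(arr):
--     # Stage 1: collect the positions of zeros; stage 2: split that index
--     # list wherever it jumps (a gap > 1), never re-reading arr.
--     zeros = [i for i, v in enumerate(arr) if v == 0]
--     if not zeros:
--         return []
--     runs = [[zeros[0]]]
--     for prev, idx in zip(zeros, zeros[1:]):
--         if idx == prev + 1:
--             runs[-1].append(idx)
--         else:
--             runs.append([idx])
--     return runs
-- ===== Notes on version B (the rewrite author's own statement) =====
-- stated objective: alternative
-- what changed: B is staged: it first extracts the list of zero positions, then groups that index list by splitting it where successive indices are not adjacent (gap > 1), never re-reading the array, whereas A scans the array once flushing an accumulator at every non-zero element.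
import Mathlib
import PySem

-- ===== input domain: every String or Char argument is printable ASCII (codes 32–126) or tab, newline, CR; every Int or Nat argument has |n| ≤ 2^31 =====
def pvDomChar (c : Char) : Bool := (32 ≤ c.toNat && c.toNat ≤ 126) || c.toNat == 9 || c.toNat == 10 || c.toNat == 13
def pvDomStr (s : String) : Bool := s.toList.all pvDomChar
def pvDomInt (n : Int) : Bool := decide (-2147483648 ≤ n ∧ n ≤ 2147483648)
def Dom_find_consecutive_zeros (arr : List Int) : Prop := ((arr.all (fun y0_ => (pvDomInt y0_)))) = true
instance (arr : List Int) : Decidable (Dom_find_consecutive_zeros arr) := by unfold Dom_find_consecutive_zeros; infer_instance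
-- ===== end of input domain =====

-- B stages the work — extract the zero positions, then split that index list at gaps — instead of A's flush-on-nonzero scan (same cost; objective: alternative).

-- ===== PORT A =====
-- A: enumerate-driven accumulator loop — grow current_zeros on 0, flush it on non-zero, final flush.
def find_consecutive_zeros (arr : List Int) : List (List Int) :=
  let st := (PySem.List.enumerate arr).foldl
    (fun (s : List (List Int) × List Int) (p : Int × Int) =>
      if p.2 = 0 then (s.1, s.2 ++ [p.1])
      else if s.2 ≠ [] then (s.1 ++ [s.2], []) else s)
    ([], [])
  if st.2 ≠ [] then st.1 ++ [st.2] else st.1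

-- ===== PORT B =====
-- B (port of Source B): zeros = positions of zeros; then fold over zip(zeros, zeros[1:]),
-- extending the last run when idx == prev + 1, otherwise opening a new run [idx].
def find_consecutive_zeros_alt (arr : List Int) : List (List Int) :=
  let zeros := (PySem.List.enumerate arr).flatMap (fun p => if p.2 = 0 then [p.1] else [])
  match zeros with
  | [] => []
  | z :: rest =>
    ((z :: rest).zip rest).foldl
      (fun (runs : List (List Int)) (p : Int × Int) =>
        if p.2 = p.1 + 1 then runs.dropLast ++ [(runs.getLastD []) ++ [p.2]]
        else runs ++ [[p.2]])
      [[z]]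

-- ===== PRECONDITION & SPEC =====
def Spec_find_consecutive_zeros (arr : List Int) (out : List (List Int)) : Prop := out = find_consecutive_zeros_alt arr
instance (arr : List Int) (out : List (List Int)) : Decidable (Spec_find_consecutive_zeros arr out) := by unfold Spec_find_consecutive_zeros; infer_instance

-- ===== CLAIM (what is proved, stated in full; the proofs are below) =====
def Claim_equal_find_consecutive_zeros : Prop := ∀ (arr : List Int), Dom_find_consecutive_zeros arr → Spec_find_consecutive_zeros arr (find_consecutive_zeros arr)

-- ===== LEMMAS AND PROOFS =====

-- proof-only reference function: the maximal zero-runs of l with indices starting at i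
def pvRuns (i : Int) (l : List Int) : List (List Int) :=
  match l with
  | [] => []
  | v :: rest =>
    let key := decide (v = 0)
    let grp := rest.takeWhile (fun w => decide (w = 0) == key)
    let rest' := rest.dropWhile (fun w => decide (w = 0) == key)
    let out := pvRuns (i + (1 + grp.length)) rest'
    if key then ((List.range (1 + grp.length)).map (fun k => i + (k : Int))) :: out else out
termination_by l.length
decreasing_by
  exact Nat.lt_succ_of_le (List.length_dropWhile_le _ _)

-- proof-only: the zero positions of l, indices starting at i (stage 1 of B, generalized)
def pvZeros (i : Int) (l : List Int) : List Int :=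
  (PySem.List.enumerate l i).flatMap (fun p => if p.2 = 0 then [p.1] else [])

-- proof-only: split an index list into maximal chains of consecutive integers (stage 2 of B, recursively)
def pvSplit1 (z : Int) (zs : List Int) : List (List Int) :=
  match zs with
  | [] => [[z]]
  | w :: r =>
    if w = z + 1 then (z :: (pvSplit1 w r).headD []) :: (pvSplit1 w r).tail
    else [z] :: pvSplit1 w r

-- merge a pending zero-run `cur` into the runs of the remaining list `l`
def pvGlue (cur : List Int) (l : List Int) (runs : List (List Int)) : List (List Int) :=
  if cur = [] then runs else
  match l with
  | [] => [cur]
  | v :: _ => if v = 0 then (cur ++ runs.headD []) :: runs.tail else cur :: runs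

lemma pvFlatMap_single {a b : Type} (g : a → b) (l : List a) :
    l.flatMap (fun x => [g x]) = l.map g := by
  induction l with
  | nil => rfl
  | cons x xs ih => simp [List.flatMap_cons, ih]

-- reference-function step lemmas
lemma runs_cons_zero_stop (i : Int) (rest : List Int)
    (h : rest = [] ∨ ∃ w r, rest = w :: r ∧ w ≠ 0) :
    pvRuns i (0 :: rest) = [i] :: pvRuns (i + 1) rest := by
  rcases h with h | ⟨w, r, rfl, hw⟩
  · subst h; simp [pvRuns]
  · rw [pvRuns]
    simp [hw, List.range_succ_eq_map]

lemma runs_cons_zero_zero (i : Int) (rest : List Int) :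
    pvRuns i (0 :: 0 :: rest)
      = (i :: (pvRuns (i + 1) (0 :: rest)).headD [])
        :: (pvRuns (i + 1) (0 :: rest)).tail := by
  rw [pvRuns, pvRuns]
  simp only [decide_true, List.takeWhile_cons, List.dropWhile_cons,
    beq_self_eq_true, if_true]
  simp [List.range_succ_eq_map, List.map_map, Function.comp_def, add_assoc, add_comm 1]
  constructor
  · rw [pvFlatMap_single, pvFlatMap_single]; simp only [List.map_map]
    apply List.map_congr_left
    intro x _
    simp only [Function.comp_apply]
    push_cast
    ring
  · ring_nf

lemma runs_cons_nonzero (i : Int) (v : Int) (rest : List Int) (hv : v ≠ 0) :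
    pvRuns i (v :: rest) = pvRuns (i + 1) rest := by
  match rest with
  | [] => simp [pvRuns, hv]
  | w :: r =>
    by_cases hw : w = 0
    · subst hw
      rw [pvRuns]
      simp [hv]
    · rw [pvRuns, pvRuns]
      simp only [hv, hw, decide_false, List.takeWhile_cons, List.dropWhile_cons,
        beq_self_eq_true, if_true]
      simp
      ring_nf

-- A-side loop characterization
lemma loop_eq_glue (l : List Int) : ∀ (i : Int) (done : List (List Int)) (cur : List Int),
    (let st := (PySem.List.enumerate l i).foldl
        (fun (s : List (List Int) × List Int) (p : Int × Int) =>
          if p.2 = 0 then (s.1, s.2 ++ [p.1])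
          else if s.2 ≠ [] then (s.1 ++ [s.2], []) else s)
        (done, cur)
     if st.2 ≠ [] then st.1 ++ [st.2] else st.1)
      = done ++ pvGlue cur l (pvRuns i l) := by
  induction l with
  | nil =>
    intro i done cur
    by_cases hc : cur = [] <;>
      simp [PySem.List.enumerate_nil, pvRuns, pvGlue, hc]
  | cons v rest ih =>
    intro i done cur
    rw [PySem.List.enumerate_cons]
    by_cases hv : v = 0
    · subst hv
      simp only [List.foldl_cons, if_true]
      rw [ih (i + 1) done (cur ++ [i])]
      congr 1
      match rest with
      | [] =>
        by_cases hc : cur = [] <;>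
          simp [pvGlue, hc, pvRuns]
      | w :: r =>
        by_cases hw : w = 0
        · subst hw
          rw [runs_cons_zero_zero]
          by_cases hc : cur = [] <;> simp [pvGlue, hc]
        · rw [runs_cons_zero_stop i (w :: r) (Or.inr ⟨w, r, rfl, hw⟩)]
          by_cases hc : cur = [] <;> simp [pvGlue, hc, hw]
    · simp only [List.foldl_cons, if_neg hv]
      rw [runs_cons_nonzero i v rest hv]
      by_cases hc : cur = []
      · subst hc
        simp only [ne_eq, not_true_eq_false, if_neg, not_false_eq_true]
        rw [ih (i + 1) done []]
        simp [pvGlue]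
      · simp only [ne_eq, hc, not_false_eq_true, if_pos]
        rw [ih (i + 1) (done ++ [cur]) []]
        simp [pvGlue, hc, hv]

-- pvZeros structure
lemma pvZeros_nil (i : Int) : pvZeros i [] = [] := by
  simp [pvZeros, PySem.List.enumerate_nil]

lemma pvZeros_cons_zero (i : Int) (rest : List Int) :
    pvZeros i (0 :: rest) = i :: pvZeros (i + 1) rest := by
  simp [pvZeros, PySem.List.enumerate_cons]

lemma pvZeros_cons_nonzero (i : Int) (v : Int) (rest : List Int) (hv : v ≠ 0) :
    pvZeros i (v :: rest) = pvZeros (i + 1) rest := by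
  simp [pvZeros, PySem.List.enumerate_cons, hv]

lemma pvZeros_lb (l : List Int) : ∀ (i : Int), ∀ x ∈ pvZeros i l, i ≤ x := by
  induction l with
  | nil => intro i x hx; simp [pvZeros_nil] at hx
  | cons v rest ih =>
    intro i x hx
    by_cases hv : v = 0
    · subst hv
      rw [pvZeros_cons_zero, List.mem_cons] at hx
      rcases hx with hx | hx
      · simp [hx]
      · exact le_trans (by omega) (ih (i + 1) x hx)
    · rw [pvZeros_cons_nonzero i v rest hv] at hx
      exact le_trans (by omega) (ih (i + 1) x hx)

-- the full gap-split of an index list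
def pvSplitAll (zs : List Int) : List (List Int) :=
  match zs with
  | [] => []
  | z :: rest => pvSplit1 z rest

-- pvSplit1 always yields a first run starting with z
lemma pvSplit1_shape (z : Int) (zs : List Int) :
    ∃ t rs, pvSplit1 z zs = (z :: t) :: rs := by
  match zs with
  | [] => exact ⟨[], [], rfl⟩
  | w :: r =>
    by_cases hw : w = z + 1
    · exact ⟨(pvSplit1 w r).headD [], (pvSplit1 w r).tail, by simp [pvSplit1, hw]⟩
    · exact ⟨[], pvSplit1 w r, by simp [pvSplit1, hw]⟩

-- the reference runs are the gap-split of the zero positions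
lemma runs_eq_split (l : List Int) : ∀ (i : Int),
    pvRuns i l = pvSplitAll (pvZeros i l) := by
  induction l with
  | nil => intro i; simp [pvRuns, pvZeros_nil, pvSplitAll]
  | cons v rest ih =>
    intro i
    by_cases hv : v = 0
    · subst hv
      rw [pvZeros_cons_zero]
      match hr : rest with
      | [] =>
        rw [runs_cons_zero_stop i [] (Or.inl rfl)]
        simp [pvRuns, pvZeros_nil, pvSplitAll, pvSplit1]
      | w :: r =>
        by_cases hw : w = 0
        · subst hw
          rw [runs_cons_zero_zero, ih (i + 1), pvZeros_cons_zero]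
          simp only [pvSplitAll]
          obtain ⟨t, rs, hs⟩ := pvSplit1_shape (i + 1) (pvZeros (i + 1 + 1) r)
          rw [hs]
          simp [pvSplit1, hs]
        · rw [runs_cons_zero_stop i (w :: r) (Or.inr ⟨w, r, rfl, hw⟩), ih (i + 1),
            pvZeros_cons_nonzero (i + 1) w r hw]
          simp only [pvSplitAll]
          match hz : pvZeros (i + 1 + 1) r with
          | [] => simp [pvSplit1]
          | z :: zs =>
            have hzb : i + 1 + 1 ≤ z := pvZeros_lb r (i + 1 + 1) z (by rw [hz]; simp)
            simp [pvSplit1, show z ≠ i + 1 by omega]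
    · rw [runs_cons_nonzero i v rest hv, pvZeros_cons_nonzero i v rest hv, ih (i + 1)]

-- B's fold over adjacent pairs computes pvSplit1, up to a pending prefix of the first run
lemma zip_adj_cons (z w : Int) (r : List Int) :
    (z :: w :: r).zip (w :: r) = (z, w) :: (w :: r).zip r := by
  simp

lemma foldl_split (zs : List Int) :
    ∀ (z : Int) (init : List (List Int)) (cur : List Int) (t : List Int) (rs : List (List Int)),
    pvSplit1 z zs = (z :: t) :: rs →
    ((z :: zs).zip zs).foldl
      (fun (runs : List (List Int)) (p : Int × Int) =>
        if p.2 = p.1 + 1 then runs.dropLast ++ [(runs.getLastD []) ++ [p.2]]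
        else runs ++ [[p.2]])
      (init ++ [cur ++ [z]])
      = init ++ ((cur ++ [z] ++ t) :: rs) := by
  induction zs with
  | nil =>
    intro z init cur t rs hs
    simp only [pvSplit1] at hs
    obtain ⟨ht, hrs⟩ : t = [] ∧ rs = [] := by
      constructor <;> [skip; skip] <;> injection hs with h1 h2 <;>
        first
          | (injection h1 with _ h; exact h.symm)
          | exact h2.symm
    subst ht; subst hrs
    simp
  | cons w r ih =>
    intro z init cur t rs hs
    obtain ⟨t', rs', hs'⟩ := pvSplit1_shape w r
    rw [zip_adj_cons, List.foldl_cons]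
    by_cases hw : w = z + 1
    · subst hw
      simp only [pvSplit1, hs', List.headD, List.tail] at hs
      obtain ⟨ht, hrs⟩ : t = (z + 1) :: t' ∧ rs = rs' := by
        injection hs with h1 h2
        injection h1 with _ h
        exact ⟨h.symm, h2.symm⟩
      subst ht
      rw [hrs]
      have h2 := ih (z + 1) init (cur ++ [z]) t' rs' hs'
      simpa using h2
    · simp only [pvSplit1, if_neg hw] at hs
      obtain ⟨ht, hrs⟩ : t = [] ∧ rs = pvSplit1 w r := by
        injection hs with h1 h2
        injection h1 with _ h
        exact ⟨h.symm, h2.symm⟩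
      subst ht; subst hrs
      rw [hs']
      have h2 := ih w (init ++ [cur ++ [z]]) [] t' rs' hs'
      simpa [hw] using h2

-- ===== VERDICT (by name: the statement is the Claim_ definition above) =====
theorem find_consecutive_zeros_spec : Claim_equal_find_consecutive_zeros := by
  intro arr _
  show find_consecutive_zeros arr = find_consecutive_zeros_alt arr
  have hA := loop_eq_glue arr 0 [] []
  have hA' : find_consecutive_zeros arr = pvRuns 0 arr := by
    simpa [find_consecutive_zeros, pvGlue] using hA
  have hz : (PySem.List.enumerate arr).flatMap (fun p => if p.2 = 0 then [p.1] else [])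
      = pvZeros 0 arr := rfl
  rw [hA', runs_eq_split arr 0]
  unfold find_consecutive_zeros_alt
  rw [hz]
  match hzz : pvZeros 0 arr with
  | [] => simp [pvSplitAll]
  | z :: rest =>
    obtain ⟨t, rs, hs⟩ := pvSplit1_shape z rest
    have := foldl_split rest z [] [] t rs hs
    simp only [List.nil_append] at this
    have h1 : pvSplitAll (z :: rest) = ([z] ++ t) :: rs := by simp [pvSplitAll, hs]
    exact h1.trans this.symm
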